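-- pv_equiv track=rewrite | github.com/amazon-science/pizza-semantic-parsing-dataset | utils/express_utils.py | to_prefix_notation
-- ===== SOURCE A (Python) =====
-- def to_prefix_notation(str_):
--     """
--     A simple utils method that converts the input string A(B,C(D),E) into the more
--     familiar EXR format: (A B (C D ) E ). One extra processing is the upper-casing of
--     of non-terminal nodes to match the EXR format convention.
--     :param str_: input string to be converted
--     :return: str after conversion
--     """
--     res = []
--     str_ = str_.replace(')',' )').replace('(','( ').replace(',', ' ')
--     for word in str_.split():
--         if word.endswith('('):
--             word = '(' + word.strip('(').upper()
--         res.append(word)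
--     return ' '.join(res)
-- ===== SOURCE B (Python) =====
-- def to_prefix_notation(str_):
--     """Single left-to-right character scan; no intermediate rewritten string.
--     '(' closes the current name (uppercased, as a non-terminal); ',' and
--     whitespace end the current token; ')' ends the current token and starts
--     a new one (so it glues to a following name, like the ' )' insertion)."""
--     res = []
--     buf = []
--     for ch in str_:
--         if ch == '(':
--             res.append('(' + ''.join(buf).upper())
--             buf = []
--         elif ch == ')':
--             if buf:
--                 res.append(''.join(buf))
--             buf = [')']
--         elif ch == ',' or ch.isspace():
--             if buf:
--                 res.append(''.join(buf))
--             buf = []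
--         else:
--             buf.append(ch)
--     if buf:
--         res.append(''.join(buf))
--     return ' '.join(res)
-- ===== Notes on version B (the rewrite author's own statement) =====
-- stated objective: alternative
-- what changed: A builds three intermediate rewritten strings (replace x3), splits on whitespace and post-processes each word; B makes a single left-to-right character scan that tokenizes and uppercases non-terminal names at '(' boundaries on the fly, with no intermediate strings.
import Mathlib
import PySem

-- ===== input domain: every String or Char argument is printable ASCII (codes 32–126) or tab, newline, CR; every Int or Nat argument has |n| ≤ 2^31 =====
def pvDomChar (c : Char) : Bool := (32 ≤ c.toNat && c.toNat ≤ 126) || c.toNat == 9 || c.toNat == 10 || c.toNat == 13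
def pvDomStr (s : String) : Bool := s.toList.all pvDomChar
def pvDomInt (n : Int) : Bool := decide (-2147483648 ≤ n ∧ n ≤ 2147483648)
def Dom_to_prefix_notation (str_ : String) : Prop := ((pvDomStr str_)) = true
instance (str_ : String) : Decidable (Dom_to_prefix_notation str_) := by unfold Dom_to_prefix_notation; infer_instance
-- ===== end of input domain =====

-- B replaces A's three-replace + split + second pass by ONE left-to-right character
-- scan with a token buffer (alternative decomposition; no intermediate strings).

-- ===== PORT A =====
def to_prefix_notation (str_ : String) : String :=
  PySem.Str.join " "
    ((PySem.Str.split₀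
        (PySem.Str.replace (PySem.Str.replace (PySem.Str.replace str_ ")" " )") "(" "( ") "," " ")).foldl
      (fun res word =>
        res ++ [if PySem.Str.endswith word "(" then
                  "(" ++ PySem.Str.upper (PySem.Str.stripChars word "(")
                else word])
      ([] : List String))

-- ===== PORT B =====
-- the loop of Source B: state = (res, buf); one step per input character
def pvScanB : List Char → List String → List Char → String
  | [], res, buf =>
      PySem.Str.join " " (res ++ if buf.isEmpty then [] else [String.ofList buf])
  | c :: cs, res, buf =>
      if c = '(' then
        pvScanB cs (res ++ ["(" ++ PySem.Str.upper (String.ofList buf)]) []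
      else if c = ')' then
        pvScanB cs (res ++ if buf.isEmpty then [] else [String.ofList buf]) [')']
      else if c = ',' ∨ PySem.Str.isspace c then
        pvScanB cs (res ++ if buf.isEmpty then [] else [String.ofList buf]) []
      else
        pvScanB cs res (buf ++ [c])

def to_prefix_notation_alt (str_ : String) : String := pvScanB str_.toList [] []

-- ===== PRECONDITION & SPEC =====
def Spec_to_prefix_notation (str_ : String) (out : String) : Prop := out = to_prefix_notation_alt str_
instance (str_ : String) (out : String) : Decidable (Spec_to_prefix_notation str_ out) := by unfold Spec_to_prefix_notation; infer_instance

-- ===== CLAIM (what is proved, stated in full; the proofs are below) =====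
def Claim_equal_to_prefix_notation : Prop := ∀ (str_ : String), Dom_to_prefix_notation str_ → Spec_to_prefix_notation str_ (to_prefix_notation str_)

-- ===== LEMMAS AND PROOFS =====

-- the per-character rewrite performed by A's three replace calls
def pvT (c : Char) : List Char :=
  if c = ')' then [' ', ')'] else if c = '(' then ['(', ' '] else if c = ',' then [' '] else [c]

-- A's per-word transformation, on the char-list level
def pvF (w : List Char) : List Char :=
  if PySem.Chars.endswith w ['('] then '(' :: PySem.Chars.upper (PySem.Chars.stripChars w ['(']) else w

theorem pv_replace_go_single (x : Char) (new : List Char) :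
    ∀ (fuel : Nat) (l acc : List Char), l.length ≤ fuel →
      PySem.Chars.replace.go [x] new fuel l acc
        = acc.reverse ++ l.flatMap (fun c => if c = x then new else [c]) := by
  intro fuel
  induction fuel with
  | zero =>
    intro l acc h
    match l, h with
    | [], _ => simp [PySem.Chars.replace.go]
  | succ n ih =>
    intro l acc h
    cases l with
    | nil => simp [PySem.Chars.replace.go]
    | cons c t =>
      rw [PySem.Chars.replace.go]
      by_cases hc : c = x
      · simp [hc, List.isPrefixOf, ih t _ (by simpa using h)]
      · simp [List.isPrefixOf, Ne.symm hc, hc, ih t _ (by simpa using h)]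

theorem pv_replace_single (s : List Char) (x : Char) (new : List Char) :
    PySem.Chars.replace s [x] new = s.flatMap (fun c => if c = x then new else [c]) := by
  rw [PySem.Chars.replace]
  simp [pv_replace_go_single x new s.length s [] le_rfl]

theorem pv_chain (s : List Char) :
    PySem.Chars.replace (PySem.Chars.replace (PySem.Chars.replace s [')'] [' ', ')']) ['('] ['(', ' ']) [','] [' ']
      = s.flatMap pvT := by
  simp only [pv_replace_single, List.flatMap_assoc]
  refine List.flatMap_congr ?_
  intro c _
  by_cases h1 : c = ')'
  · simp [h1, pvT]
  · by_cases h2 : c = '('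
    · simp [h2, pvT]
    · by_cases h3 : c = ','
      · simp [h3, pvT]
      · simp [h1, h2, h3, pvT]

theorem pv_go_acc (l : List Char) : ∀ (cur : List Char) (acc : List (List Char)),
    PySem.Chars.split₀.go l cur acc = acc.reverse ++ PySem.Chars.split₀.go l cur [] := by
  induction l with
  | nil =>
    intro cur acc
    by_cases h : cur.isEmpty <;> simp [PySem.Chars.split₀.go, h]
  | cons c t ih =>
    intro cur acc
    rw [PySem.Chars.split₀.go, PySem.Chars.split₀.go]
    by_cases hs : PySem.Chars.isspace c
    · by_cases h : cur.isEmpty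
      · simp [hs, h, ih [] acc]
      · simp only [hs, h, if_true, if_false, Bool.false_eq_true]
        rw [ih [] (cur.reverse :: acc), ih [] [cur.reverse]]
        simp
    · simp only [hs, Bool.false_eq_true, if_false]
      exact ih (c :: cur) acc

theorem pv_go_push (w : List Char) (h : ∀ c ∈ w, PySem.Chars.isspace c = false) :
    ∀ (l cur : List Char) (acc : List (List Char)),
      PySem.Chars.split₀.go (w ++ l) cur acc = PySem.Chars.split₀.go l (w.reverse ++ cur) acc := by
  induction w with
  | nil => intro l cur acc; simp
  | cons c t ih =>
    intro l cur acc
    rw [List.cons_append, PySem.Chars.split₀.go]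
    simp only [h c (by simp), Bool.false_eq_true, if_false]
    rw [ih (fun a ha => h a (by simp [ha])) l (c :: cur) acc]
    simp

theorem pv_split_word_sep (w : List Char) (c : Char) (rest : List Char)
    (hw : ∀ a ∈ w, PySem.Chars.isspace a = false) (hc : PySem.Chars.isspace c = true) :
    PySem.Chars.split₀ (w ++ c :: rest)
      = (if w.isEmpty then [] else [w]) ++ PySem.Chars.split₀ rest := by
  rw [PySem.Chars.split₀, pv_go_push w hw, PySem.Chars.split₀.go]
  by_cases h : w.isEmpty
  · simp_all [PySem.Chars.split₀]
  · have h' : (w.reverse ++ []).isEmpty = false := by simpa using h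
    simp only [hc, if_true, h', Bool.false_eq_true, if_false]
    rw [pv_go_acc]
    simp [PySem.Chars.split₀, h]

theorem pv_split_word (w : List Char) (hw : ∀ a ∈ w, PySem.Chars.isspace a = false) :
    PySem.Chars.split₀ w = if w.isEmpty then [] else [w] := by
  have h2 : PySem.Chars.split₀.go w [] [] = PySem.Chars.split₀.go [] (w.reverse ++ []) [] := by
    simpa using pv_go_push w hw [] [] []
  rw [PySem.Chars.split₀, h2, PySem.Chars.split₀.go]
  by_cases h : w.isEmpty <;> simp_all

theorem pv_f_no_paren (w : List Char) (h : '(' ∉ w) : pvF w = w := by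
  rw [pvF, if_neg]
  intro hs
  rw [PySem.Chars.endswith_iff] at hs
  exact h (hs.subset (by simp))

theorem pv_dropWhile_id {α : Type} (p : α → Bool) : ∀ (l : List α), (∀ c ∈ l, p c = false) → l.dropWhile p = l
  | [], _ => rfl
  | a :: t, h => by
      simp [h a (by simp)]

theorem pv_f_paren (buf : List Char) (h : '(' ∉ buf) :
    pvF (buf ++ ['(']) = '(' :: PySem.Chars.upper buf := by
  rw [pvF, if_pos (by rw [PySem.Chars.endswith_iff]; exact List.suffix_append buf _)]
  congr 1
  rw [PySem.Chars.stripChars]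
  have hall : ∀ a ∈ buf, (['('].contains a) = false := by
    intro a ha
    simp only [List.contains_eq_mem, List.mem_singleton, decide_eq_false_iff_not]
    intro he; exact h (he ▸ ha)
  cases buf with
  | nil => simp
  | cons b t =>
    rw [List.cons_append, List.dropWhile_cons]
    simp only [hall b (by simp), Bool.false_eq_true, if_false]
    rw [show ((b :: (t ++ ['('])).reverse) = '(' :: (b :: t).reverse by simp,
        List.dropWhile_cons]
    rw [if_pos (by decide)]
    rw [pv_dropWhile_id _ _ (fun a ha => hall a (List.mem_reverse.mp ha)), List.reverse_reverse]

theorem pv_ofList_paren (l : List Char) :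
    String.ofList ('(' :: l) = "(" ++ String.ofList l := by
  rw [← String.toList_inj]
  simp

-- main invariant of B's scan: the pending buffer merges with the first token of the rest
theorem pv_scan_inv : ∀ (cs : List Char) (res : List String) (buf : List Char),
    '(' ∉ buf → (∀ c ∈ buf, PySem.Chars.isspace c = false) →
    pvScanB cs res buf
      = PySem.Str.join " "
          (res ++ ((PySem.Chars.split₀ (buf ++ cs.flatMap pvT)).map pvF).map String.ofList) := by
  intro cs
  induction cs with
  | nil =>
    intro res buf hp hw
    rw [pvScanB]
    simp only [List.flatMap_nil, List.append_nil]
    rw [pv_split_word buf hw]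
    by_cases h : buf.isEmpty <;>
      simp [h, pv_f_no_paren buf hp]
  | cons c cs ih =>
    intro res buf hp hw
    rw [pvScanB]
    by_cases h1 : c = '('
    · rw [if_pos h1, ih _ [] (by simp) (by simp)]
      subst h1
      have : buf ++ List.flatMap pvT ('(' :: cs)
           = (buf ++ ['(']) ++ ' ' :: List.flatMap pvT cs := by
        simp [pvT]
      rw [this, pv_split_word_sep (buf ++ ['(']) ' ' _
            (by intro a ha
                rcases List.mem_append.mp ha with h | h
                · exact hw a h
                · simp at h; subst h; decide)
            (by decide)]
      rw [if_neg (by simp)]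
      simp [pv_f_paren buf hp, pv_ofList_paren, PySem.Str.upper]
    · rw [if_neg h1]
      by_cases h2 : c = ')'
      · rw [if_pos h2, ih _ [')'] (by simp) (by intro a ha; simp at ha; subst ha; decide)]
        subst h2
        have : buf ++ List.flatMap pvT (')' :: cs)
             = buf ++ ' ' :: (')' :: List.flatMap pvT cs) := by simp [pvT]
        rw [this, pv_split_word_sep buf ' ' _ hw (by decide)]
        by_cases h : buf.isEmpty <;>
          simp [h, pv_f_no_paren buf hp]
      · rw [if_neg h2]
        by_cases h3 : c = ',' ∨ PySem.Str.isspace c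
        · rw [if_pos h3, ih _ [] (by simp) (by simp)]
          have : ∃ c', PySem.Chars.isspace c' = true ∧
              buf ++ List.flatMap pvT (c :: cs) = buf ++ c' :: List.flatMap pvT cs := by
            rcases h3 with h3 | h3
            · exact ⟨' ', by decide, by subst h3; simp [pvT]⟩
            · refine ⟨c, h3, ?_⟩
              have hc : c ≠ ',' := by rintro rfl; revert h3; decide
              simp [pvT, h1, h2, hc]
          obtain ⟨c', hc', heq⟩ := this
          rw [heq, pv_split_word_sep buf c' _ hw hc']
          by_cases h : buf.isEmpty <;>
            simp [h, pv_f_no_paren buf hp]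
        · rw [if_neg h3]
          push Not at h3
          rw [ih _ (buf ++ [c])
                (by intro hm
                    rcases List.mem_append.mp hm with h | h
                    · exact hp h
                    · simp at h; exact h1 h.symm)
                (by intro a ha
                    rcases List.mem_append.mp ha with h | h
                    · exact hw a h
                    · simp at h; subst h
                      simpa [PySem.Str.isspace] using h3.2)]
          have : buf ++ List.flatMap pvT (c :: cs)
               = (buf ++ [c]) ++ List.flatMap pvT cs := by
            have hc : c ≠ ',' := h3.1
            simp [pvT, h1, h2, hc]
          rw [this]

-- A's word transformation agrees with pvF through String.ofList
theorem pv_G_ofList (w : List Char) :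
    (if PySem.Str.endswith (String.ofList w) "(" then
        "(" ++ PySem.Str.upper (PySem.Str.stripChars (String.ofList w) "(")
      else String.ofList w) = String.ofList (pvF w) := by
  rw [pvF]
  have he : PySem.Str.endswith (String.ofList w) "(" = PySem.Chars.endswith w ['('] := by
    rw [PySem.Str.endswith, String.toList_ofList]; rfl
  rw [he]
  by_cases h : PySem.Chars.endswith w ['(']
  · rw [if_pos h, if_pos h, ← String.toList_inj, String.toList_append, String.toList_ofList,
        PySem.Str.upper, PySem.Str.stripChars, String.toList_ofList, String.toList_ofList,
        String.toList_ofList]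
    simp
  · rw [if_neg (by simp [h]), if_neg (by simp [h])]

-- A, rewritten on the char-list level
theorem pv_A_char (str_ : String) :
    to_prefix_notation str_
      = PySem.Str.join " "
          (((PySem.Chars.split₀ (str_.toList.flatMap pvT)).map pvF).map String.ofList) := by
  unfold to_prefix_notation
  have hs : (PySem.Str.replace (PySem.Str.replace (PySem.Str.replace str_ ")" " )") "(" "( ") "," " ").toList
      = str_.toList.flatMap pvT := by
    simp only [PySem.Str.replace, String.toList_ofList]
    exact pv_chain _
  have hsplit : PySem.Str.split₀
        (PySem.Str.replace (PySem.Str.replace (PySem.Str.replace str_ ")" " )") "(" "( ") "," " ")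
      = (PySem.Chars.split₀ (str_.toList.flatMap pvT)).map String.ofList := by
    rw [PySem.Str.split₀, hs]
  rw [PySem.List.foldl_append_singleton_eq_map, hsplit, List.map_map, List.map_map]
  refine congrArg _ (List.map_congr_left ?_)
  intro w _
  exact pv_G_ofList w

-- ===== VERDICT (by name: the statement is the Claim_ definition above) =====
theorem to_prefix_notation_spec : Claim_equal_to_prefix_notation := by
  intro str_ _
  unfold Spec_to_prefix_notation
  rw [pv_A_char, to_prefix_notation_alt,
      pv_scan_inv str_.toList [] [] (by simp) (by simp)]
  simp
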